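-- pv_equiv track=rewrite | github.com/sweetpea-org/sweetpea-py | sweetpea/_internal/auto_correlation_score.py | create_x_y_sample
-- ===== SOURCE A (Python) =====
-- def create_x_y_sample(sample: dict, y_factor: str, k: int = 10) -> tuple:
--     """create the independent and dependent values in a sample"""
--     x_lists = []
--     y_list = sample[y_factor]
--     for key in sample.keys():
--         x_lists.append(sample[key])
--     k_ = min(len(y_list) // 2, k)
--     start = 0
--     end = k_
--     x_res = []
--     y_res = []
--     if len(y_list) <= k_:
--         raise Exception('predict distance to high in auto correlation test')
--     while end < len(y_list):
--         x_temp = []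
--         for x in x_lists:
--             x_temp += x[start: end]
--         x_res.append(x_temp)
--         y_res.append(y_list[end])
--         start += 1
--         end += 1
--     return x_res, y_res
-- ===== SOURCE B (Python) =====
-- def create_x_y_sample(sample: dict, y_factor: str, k: int = 10) -> tuple:
--     """create the independent and dependent values in a sample"""
--     y_list = sample[y_factor]
--     k_ = min(len(y_list) // 2, k)
--     if len(y_list) <= k_:
--         raise Exception('predict distance to high in auto correlation test')
--     num = len(y_list) - k_
--     windows = [[col[p:p + k_] for p in range(num)] for col in sample.values()]
--     x_res = [[v for w in windows for v in w[i]] for i in range(num)]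
--     y_res = [y_list[k_ + i] for i in range(num)]
--     return x_res, y_res
-- ===== Notes on version B (the rewrite author's own statement) =====
-- stated objective: alternative
-- what changed: Replaces A's while-loop with mutable start/end cursors and row-wise '+='-accumulation by a column-major decomposition: per-factor window lists are precomputed, then rows are assembled by flattening the i-th window of each column, with y built by a direct indexed comprehension.
import Mathlib
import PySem

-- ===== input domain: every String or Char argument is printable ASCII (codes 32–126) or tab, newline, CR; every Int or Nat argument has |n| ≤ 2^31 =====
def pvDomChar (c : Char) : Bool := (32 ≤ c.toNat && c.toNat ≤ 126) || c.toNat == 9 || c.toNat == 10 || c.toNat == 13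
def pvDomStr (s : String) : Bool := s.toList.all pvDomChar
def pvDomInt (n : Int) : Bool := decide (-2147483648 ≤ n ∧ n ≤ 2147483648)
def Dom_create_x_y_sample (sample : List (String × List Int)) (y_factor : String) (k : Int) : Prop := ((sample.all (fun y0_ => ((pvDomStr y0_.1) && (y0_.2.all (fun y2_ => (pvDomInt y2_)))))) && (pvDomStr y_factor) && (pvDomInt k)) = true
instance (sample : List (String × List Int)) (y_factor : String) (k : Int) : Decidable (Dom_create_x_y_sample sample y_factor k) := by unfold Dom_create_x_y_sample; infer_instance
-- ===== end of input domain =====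

-- B replaces A's while-loop with start/end cursors and row-wise '+=' accumulation by a
-- column-major decomposition: per-factor window lists are precomputed, then each row is the
-- flattening of the i-th window of every column; same cost, proved equal on Pre_.

-- ===== PORT A =====
-- while end < len(y_list): build x_temp by '+=' of slices, append, advance start/end
def pvALoop (x_lists : List (List Int)) (y_list : List Int) (start e : Int)
    (xres : List (List Int)) (yres : List Int) : List (List Int) × List Int :=
  if _h : e < (y_list.length : Int) then
    let x_temp := x_lists.foldl (fun acc x => acc ++ PySem.List.slice x (some start) (some e)) []
    pvALoop x_lists y_list (start + 1) (e + 1)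
      (xres ++ [x_temp]) (yres ++ [(PySem.List.pyGet? y_list e).getD 0])
  else (xres, yres)
termination_by ((y_list.length : Int) - e).toNat
decreasing_by omega

def create_x_y_sample (sample : List (String × List Int)) (y_factor : String) (k : Int) : List (List Int) × List Int :=
  let d := PySem.Dict.mk sample
  let y_list := (d.get? y_factor).getD []          -- sample[y_factor]; KeyError excluded by Pre_
  let x_lists := d.keys.map (fun key => (d.get? key).getD [])
  let k_ := min (PySem.Int.floordiv (y_list.length : Int) 2) k
  if (y_list.length : Int) ≤ k_ then ([], [])      -- Python raises here; excluded by Pre_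
  else pvALoop x_lists y_list 0 k_ [] []

-- ===== PORT B =====
def create_x_y_sample_alt (sample : List (String × List Int)) (y_factor : String) (k : Int) : List (List Int) × List Int :=
  let d := PySem.Dict.mk sample
  let y_list := (d.get? y_factor).getD []
  let k_ := min (PySem.Int.floordiv (y_list.length : Int) 2) k
  if (y_list.length : Int) ≤ k_ then ([], [])      -- Python raises here; excluded by Pre_
  else
    let num := (y_list.length : Int) - k_
    let windows := d.values.map (fun col =>
      (PySem.List.pyRange 0 num 1).map (fun p => PySem.List.slice col (some p) (some (p + k_))))
    let x_res := (PySem.List.pyRange 0 num 1).map (fun i =>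
      (windows.map (fun w => PySem.List.pyGetD w i [])).flatten)
    let y_res := (PySem.List.pyRange 0 num 1).map (fun i =>
      (PySem.List.pyGet? y_list (k_ + i)).getD 0)
    (x_res, y_res)

-- ===== PRECONDITION & SPEC =====
-- Pre_ excludes exactly: a missing y_factor key (KeyError), an empty y_list (the explicit
-- Exception when k >= 0, IndexError on y_list[end] when k < 0), k < -len(y_list) (IndexError
-- on the negative index y_list[end]), and duplicate keys in the association list, which a
-- Python dict cannot represent (dict() collapses them), so the model is ambiguous there.
def Pre_create_x_y_sample (sample : List (String × List Int)) (y_factor : String) (k : Int) : Prop :=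
  (sample.map Prod.fst).Nodup ∧
  ((PySem.Dict.mk sample).get? y_factor).isSome = true ∧
  ((PySem.Dict.mk sample).get? y_factor).getD [] ≠ [] ∧
  -(((((PySem.Dict.mk sample).get? y_factor).getD []).length : Int)) ≤ k
instance (sample : List (String × List Int)) (y_factor : String) (k : Int) : Decidable (Pre_create_x_y_sample sample y_factor k) := by unfold Pre_create_x_y_sample; infer_instance

def pvWitness_create_x_y_sample : (List (String × List Int)) × String × Int :=
  ([("a", [1, 2, 3, 4]), ("b", [5, 6, 7, 8])], "a", 1)

def Spec_create_x_y_sample (sample : List (String × List Int)) (y_factor : String) (k : Int) (out : List (List Int) × List Int) : Prop := out = create_x_y_sample_alt sample y_factor k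
instance (sample : List (String × List Int)) (y_factor : String) (k : Int) (out : List (List Int) × List Int) : Decidable (Spec_create_x_y_sample sample y_factor k out) := by unfold Spec_create_x_y_sample; infer_instance

-- ===== CLAIM (what is proved, stated in full; the proofs are below) =====
def Claim_equal_create_x_y_sample : Prop := ∀ (sample : List (String × List Int)) (y_factor : String) (k : Int), Dom_create_x_y_sample sample y_factor k → Pre_create_x_y_sample sample y_factor k → Spec_create_x_y_sample sample y_factor k (create_x_y_sample sample y_factor k)

-- ===== LEMMAS AND PROOFS =====

theorem pvALoop_spec (x_lists : List (List Int)) (y_list : List Int) (k_ i : Int)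
    (xa : List (List Int)) (ya : List Int) :
    pvALoop x_lists y_list i (k_ + i) xa ya =
      (xa ++ (PySem.List.pyRange i ((y_list.length : Int) - k_) 1).map (fun j =>
        x_lists.foldl (fun acc x => acc ++ PySem.List.slice x (some j) (some (k_ + j))) []),
       ya ++ (PySem.List.pyRange i ((y_list.length : Int) - k_) 1).map (fun j =>
        (PySem.List.pyGet? y_list (k_ + j)).getD 0)) := by
  by_cases h : k_ + i < (y_list.length : Int)
  · have hlt : i < (y_list.length : Int) - k_ := by omega
    rw [pvALoop, dif_pos h, PySem.List.pyRange_one_cons hlt]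
    have ih := pvALoop_spec x_lists y_list k_ (i + 1)
      (xa ++ [x_lists.foldl (fun acc x => acc ++ PySem.List.slice x (some i) (some (k_ + i))) []])
      (ya ++ [(PySem.List.pyGet? y_list (k_ + i)).getD 0])
    rw [show k_ + (i + 1) = k_ + i + 1 by ring] at ih
    rw [ih]
    simp
  · rw [pvALoop, dif_neg h, PySem.List.pyRange_one_eq_nil (by omega)]
    simp
termination_by ((y_list.length : Int) - (k_ + i)).toNat
decreasing_by omega

-- ===== VERDICT (by name: the statement is the Claim_ definition above) =====
theorem create_x_y_sample_spec : Claim_equal_create_x_y_sample := by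
  intro sample y_factor k _ hpre
  obtain ⟨hnd, hsome, hne, hk⟩ := hpre
  unfold Spec_create_x_y_sample create_x_y_sample create_x_y_sample_alt
  set d := PySem.Dict.mk sample with hd
  set y := (d.get? y_factor).getD [] with hydef
  have hlen : 1 ≤ y.length := List.length_pos_iff.mpr hne
  have hfd : PySem.Int.floordiv ((y.length : Nat) : Int) 2 = ((y.length : Nat) : Int) / 2 :=
    PySem.Int.floordiv_eq_ediv_of_pos (by omega)
  set k_ := min (PySem.Int.floordiv ((y.length : Nat) : Int) 2) k with hk_def
  have hklt : k_ < (y.length : Int) := by omega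
  have hnotle : ¬ ((y.length : Int) ≤ k_) := by omega
  dsimp only
  rw [if_neg hnotle, if_neg hnotle]
  have hmain := pvALoop_spec (d.keys.map (fun key => (d.get? key).getD [])) y k_ 0 [] []
  rw [show k_ + (0 : Int) = k_ by ring] at hmain
  rw [hmain]
  have hndk : d.keys.Nodup := by
    simpa only [PySem.Dict.keys, hd] using hnd
  have hvals : d.values = d.keys.map (fun key => (d.get? key).getD []) := by
    rw [PySem.Dict.values_eq_map_keys d hndk []]
    exact List.map_congr_left (fun key _ => PySem.Dict.getD_eq_get?_getD d key [])
  rw [← hydef, ← hk_def, Prod.mk.injEq]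
  refine ⟨?_, by simp⟩
  simp only [List.nil_append]
  apply List.map_congr_left
  intro j hj
  rw [PySem.List.mem_pyRange_one] at hj
  rw [PySem.List.foldl_append_eq_flatMap, List.nil_append, hvals]
  rw [List.map_map, ← List.flatMap_def]
  apply List.flatMap_congr
  intro col _
  simp only [Function.comp]
  rw [PySem.List.pyGetD_map_pyRange_of_nonneg _ _ _ _ hj.1 hj.2]
  rw [add_comm k_ j]
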